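-- pv_equiv track=rewrite | github.com/jacskir/advent-of-code | 2021/5.py | get_max_dimensions
-- ===== SOURCE A (Python) =====
-- def get_max_dimensions(vents):
--     max_w = 0
--     max_h = 0
--     for vent in vents:
--         for point in vent:
--             if point[0] > max_w:
--                 max_w = point[0]
--             if point[1] > max_h:
--                 max_h = point[1]
--
--     return max_w, max_h
-- ===== SOURCE B (Python) =====
-- def get_max_dimensions(vents):
--     points = [point for vent in vents for point in vent]
--     max_w = max((point[0] for point in points), default=0)
--     max_h = max((point[1] for point in points), default=0)
--     return max(0, max_w), max(0, max_h)
-- ===== Notes on version B (the rewrite author's own statement) =====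
-- stated objective: idiomatic
-- what changed: Replaces the single nested loop with two running maxima by flattening the points once and taking two independent builtin max reductions (floored at 0), one per coordinate.
import Mathlib
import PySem

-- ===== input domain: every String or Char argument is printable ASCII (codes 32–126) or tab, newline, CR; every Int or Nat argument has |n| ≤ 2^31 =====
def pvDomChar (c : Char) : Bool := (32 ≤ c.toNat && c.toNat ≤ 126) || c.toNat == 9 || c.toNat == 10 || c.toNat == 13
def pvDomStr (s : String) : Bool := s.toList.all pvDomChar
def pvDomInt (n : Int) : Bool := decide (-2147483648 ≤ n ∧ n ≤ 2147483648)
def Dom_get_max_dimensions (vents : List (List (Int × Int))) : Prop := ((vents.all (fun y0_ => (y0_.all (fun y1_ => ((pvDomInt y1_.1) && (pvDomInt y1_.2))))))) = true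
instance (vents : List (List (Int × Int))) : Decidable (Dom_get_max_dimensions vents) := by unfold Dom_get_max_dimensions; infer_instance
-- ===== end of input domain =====

-- B flattens the points once and computes the two coordinate maxima as two independent
-- builtin max reductions (floored at 0) instead of A's single nested loop with two running maxima.


-- ===== PORT A =====
def get_max_dimensions (vents : List (List (Int × Int))) : Int × Int :=
  let st := vents.foldl (fun st vent =>
    vent.foldl (fun st point =>
      let max_w := if point.1 > st.1 then point.1 else st.1
      let max_h := if point.2 > st.2 then point.2 else st.2
      (max_w, max_h)) st) (0, 0)
  (st.1, st.2)

-- ===== PORT B =====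
-- max(gen, default=0): 0 on the empty list, else the maximum
def pyMaxD0 (xs : List Int) : Int :=
  match xs with
  | [] => 0
  | x :: rest => rest.foldl max x

def get_max_dimensions_alt (vents : List (List (Int × Int))) : Int × Int :=
  let points := vents.flatMap (fun vent => vent)
  let max_w := pyMaxD0 (points.map Prod.fst)
  let max_h := pyMaxD0 (points.map Prod.snd)
  (max 0 max_w, max 0 max_h)

-- ===== PRECONDITION & SPEC =====
def Spec_get_max_dimensions (vents : List (List (Int × Int))) (out : Int × Int) : Prop := out = get_max_dimensions_alt vents
instance (vents : List (List (Int × Int))) (out : Int × Int) : Decidable (Spec_get_max_dimensions vents out) := by unfold Spec_get_max_dimensions; infer_instance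

-- ===== CLAIM (what is proved, stated in full; the proofs are below) =====
def Claim_equal_get_max_dimensions : Prop := ∀ (vents : List (List (Int × Int))), Dom_get_max_dimensions vents → Spec_get_max_dimensions vents (get_max_dimensions vents)

-- ===== LEMMAS AND PROOFS =====

theorem pvFoldl_max_init (l : List Int) (a b : Int) :
    l.foldl max (max a b) = max a (l.foldl max b) := by
  induction l generalizing b with
  | nil => rfl
  | cons x xs ih =>
    simp only [List.foldl_cons]
    rw [max_assoc]
    exact ih (max b x)

-- A's nested loop equals a single fold over the flattened point list.
theorem pvNested_eq_flat (vents : List (List (Int × Int)))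
    (f : Int × Int → Int × Int → Int × Int) (init : Int × Int) :
    vents.foldl (fun st vent => vent.foldl f st) init
      = (vents.flatMap (fun vent => vent)).foldl f init := by
  induction vents generalizing init with
  | nil => rfl
  | cons v vs ih => simp only [List.foldl_cons, List.flatMap_cons, List.foldl_append]; exact ih _

-- A's step on the flat list computes the two coordinate maxima componentwise.
theorem pvFlat_fold (l : List (Int × Int)) (w h : Int) :
    l.foldl (fun st point =>
      ((if point.1 > st.1 then point.1 else st.1 : Int),
       (if point.2 > st.2 then point.2 else st.2 : Int))) (w, h)
      = ((l.map Prod.fst).foldl max w, (l.map Prod.snd).foldl max h) := by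
  induction l generalizing w h with
  | nil => rfl
  | cons p ps ih =>
    simp only [List.foldl_cons, List.map_cons]
    rw [show ((if p.1 > w then p.1 else w : Int)) = max w p.1 by split_ifs <;> omega,
        show ((if p.2 > h then p.2 else h : Int)) = max h p.2 by split_ifs <;> omega]
    exact ih _ _

theorem pvMaxD0_floor (l : List Int) : max 0 (pyMaxD0 l) = l.foldl max 0 := by
  cases l with
  | nil => rfl
  | cons x xs => simp only [pyMaxD0, List.foldl_cons]; rw [pvFoldl_max_init]

-- ===== VERDICT (by name: the statement is the Claim_ definition above) =====
theorem get_max_dimensions_spec : Claim_equal_get_max_dimensions := by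
  intro vents _
  unfold Spec_get_max_dimensions get_max_dimensions get_max_dimensions_alt
  rw [pvNested_eq_flat, pvFlat_fold, ← pvMaxD0_floor, ← pvMaxD0_floor]
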